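-- pv_equiv track=rewrite | github.com/yingl/LintCodeInPython | the-longest-common-prefix-ii.py | the_longest_common_prefix
-- ===== SOURCE A (Python) =====
-- def the_longest_common_prefix(dic, target):
--     # write your code here
--     ret = 0
--     for word in dic:
--         tmp = 0
--         for i in range(min(len(word), len(target))):
--             if word[i] == target[i]:
--                 tmp += 1
--             else:
--                 break
--         if tmp > ret:
--             ret = tmp
--     return ret
-- ===== SOURCE B (Python) =====
-- def the_longest_common_prefix(dic, target):
--     # Column-major: keep shrinking the set of words that still match target
--     # on positions 0..i; the answer is the last position reached.
--     ret = 0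
--     candidates = list(dic)
--     for i in range(len(target)):
--         candidates = [w for w in candidates if i < len(w) and w[i] == target[i]]
--         if not candidates:
--             break
--         ret = i + 1
--     return ret
-- ===== Notes on version B (the rewrite author's own statement) =====
-- stated objective: alternative
-- what changed: Replaces the word-major double loop (best common-prefix length per word, maximum kept) by a column-major scan that keeps a shrinking list of still-matching candidate words and advances one character position of target at a time.
import Mathlib
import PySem

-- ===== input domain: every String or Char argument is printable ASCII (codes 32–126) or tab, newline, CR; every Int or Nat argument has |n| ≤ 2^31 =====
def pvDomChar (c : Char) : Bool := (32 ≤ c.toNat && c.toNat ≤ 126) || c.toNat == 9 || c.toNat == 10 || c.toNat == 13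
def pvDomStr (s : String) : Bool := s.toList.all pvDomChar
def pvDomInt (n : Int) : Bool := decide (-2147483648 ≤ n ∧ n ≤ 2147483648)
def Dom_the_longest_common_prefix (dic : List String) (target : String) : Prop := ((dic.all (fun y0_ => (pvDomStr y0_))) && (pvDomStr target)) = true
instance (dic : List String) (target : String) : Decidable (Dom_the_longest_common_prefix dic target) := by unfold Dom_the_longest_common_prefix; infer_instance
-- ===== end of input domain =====

-- B replaces A's word-major double loop by a column-major scan over target's
-- positions that keeps the shrinking list of still-matching candidate words
-- (alternative decomposition, same exact result).

-- ===== PORT A =====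
-- inner loop: for i in range(min(len(word), len(target))): if word[i] == target[i]: tmp += 1 else: break
def pvALoop (word target : List Char) : List Int → Int → Int
  | [], tmp => tmp
  | i :: rest, tmp =>
    if PySem.List.pyGet? word i = PySem.List.pyGet? target i then
      pvALoop word target rest (tmp + 1)
    else tmp

def the_longest_common_prefix (dic : List String) (target : String) : Int :=
  dic.foldl (fun ret word =>
    let tmp := pvALoop word.toList target.toList
      (PySem.List.pyRange 0 (min (PySem.Str.len word) (PySem.Str.len target)) 1) 0
    if tmp > ret then tmp else ret) 0

-- ===== PORT B =====
-- for i in range(len(target)): candidates = [w for w in candidates if i < len(w) and w[i] == target[i]]; if not candidates: break; ret = i + 1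
def pvBLoop (target : List Char) : List Int → List String → Int → Int
  | [], _, ret => ret
  | i :: rest, cands, ret =>
    let cands' := cands.filter (fun w =>
      decide (i < PySem.Str.len w) && (PySem.List.pyGet? w.toList i == PySem.List.pyGet? target i))
    if cands' = [] then ret else pvBLoop target rest cands' (i + 1)

def the_longest_common_prefix_alt (dic : List String) (target : String) : Int :=
  pvBLoop target.toList (PySem.List.pyRange 0 (PySem.Str.len target) 1) dic 0

-- ===== PRECONDITION & SPEC =====
def Spec_the_longest_common_prefix (dic : List String) (target : String) (out : Int) : Prop := out = the_longest_common_prefix_alt dic target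
instance (dic : List String) (target : String) (out : Int) : Decidable (Spec_the_longest_common_prefix dic target out) := by unfold Spec_the_longest_common_prefix; infer_instance

-- ===== CLAIM (what is proved, stated in full; the proofs are below) =====
def Claim_equal_the_longest_common_prefix : Prop := ∀ (dic : List String) (target : String), Dom_the_longest_common_prefix dic target → Spec_the_longest_common_prefix dic target (the_longest_common_prefix dic target)

-- ===== LEMMAS AND PROOFS =====

-- common-prefix length of two char lists
def cpl : List Char → List Char → Nat
  | a :: as, b :: bs => if a = b then cpl as bs + 1 else 0
  | _, _ => 0

@[simp] theorem cpl_nil_left (t : List Char) : cpl [] t = 0 := by cases t <;> rfl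
@[simp] theorem cpl_nil_right (w : List Char) : cpl w [] = 0 := by cases w <;> rfl
@[simp] theorem cpl_cons (a b : Char) (as bs : List Char) :
    cpl (a :: as) (b :: bs) = if a = b then cpl as bs + 1 else 0 := rfl

theorem cpl_le_right (w t : List Char) : cpl w t ≤ t.length := by
  induction t generalizing w with
  | nil => simp
  | cons b bs ih =>
    cases w with
    | nil => simp
    | cons a as =>
      simp only [cpl_cons]
      split_ifs
      · simpa using Nat.succ_le_succ (ih as)
      · simp

-- one more matching character ↔ position k is in range and the chars agree
theorem cpl_succ_iff (k : Nat) : ∀ (w t : List Char), k ≤ cpl w t → k < t.length →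
    (k + 1 ≤ cpl w t ↔ k < w.length ∧ w[k]? = t[k]?) := by
  induction k with
  | zero =>
    intro w t _ ht
    cases t with
    | nil => simp at ht
    | cons b bs =>
      cases w with
      | nil => simp
      | cons a as =>
        simp only [cpl_cons, List.getElem?_cons_zero, List.length_cons]
        constructor
        · intro h
          by_cases hab : a = b
          · simp [hab]
          · simp [hab] at h
        · rintro ⟨-, h⟩
          simp only [Option.some.injEq] at h
          simp [h]
  | succ k ih =>
    intro w t hk ht
    cases t with
    | nil => simp at ht
    | cons b bs =>
      cases w with
      | nil => simp at hk
      | cons a as =>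
        by_cases hab : a = b
        · simp only [cpl_cons, if_pos hab] at hk ⊢
          have hk' : k ≤ cpl as bs := by omega
          have ht' : k < bs.length := by simpa using ht
          rw [List.getElem?_cons_succ, List.getElem?_cons_succ, List.length_cons]
          constructor
          · intro h
            have := (ih as bs hk' ht').mp (by omega)
            exact ⟨by omega, this.2⟩
          · rintro ⟨h1, h2⟩
            have := (ih as bs hk' ht').mpr ⟨by omega, h2⟩
            omega
        · simp [cpl_cons, hab] at hk

-- ===== A side =====

theorem drop_eq_cons_of_lt {α : Type} (l : List α) (k : Nat) (h : k < l.length) :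
    l.drop k = l[k] :: l.drop (k + 1) := List.drop_eq_getElem_cons h

theorem pvALoop_eq (w t : List Char) : ∀ (m k : Nat) (tmp : Int),
    min w.length t.length - k = m →
    pvALoop w t (PySem.List.pyRange (k : Int) (min (w.length : Int) (t.length : Int)) 1) tmp
      = tmp + cpl (w.drop k) (t.drop k) := by
  intro m
  induction m with
  | zero =>
    intro k tmp hm
    have hk : min w.length t.length ≤ k := by omega
    have hnil : PySem.List.pyRange (k : Int) (min (w.length : Int) (t.length : Int)) 1 = [] := by
      apply PySem.List.pyRange_one_eq_nil
      omega
    rw [hnil]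
    have : cpl (w.drop k) (t.drop k) = 0 := by
      rcases min_le_iff.mp hk with h | h
      · have : w.drop k = [] := List.drop_eq_nil_of_le h
        rw [this]; simp
      · have : t.drop k = [] := List.drop_eq_nil_of_le h
        rw [this]; simp
    rw [this]
    simp [pvALoop]
  | succ m ih =>
    intro k tmp hm
    have hkw : k < w.length := by omega
    have hkt : k < t.length := by omega
    have hcons : PySem.List.pyRange (k : Int) (min (w.length : Int) (t.length : Int)) 1
        = (k : Int) :: PySem.List.pyRange ((k : Int) + 1) (min (w.length : Int) (t.length : Int)) 1 := by
      apply PySem.List.pyRange_one_cons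
      omega
    rw [hcons]
    have hgw : PySem.List.pyGet? w (k : Int) = some w[k] := by
      simp [PySem.List.pyGet?_natCast, List.getElem?_eq_getElem hkw]
    have hgt : PySem.List.pyGet? t (k : Int) = some t[k] := by
      simp [PySem.List.pyGet?_natCast, List.getElem?_eq_getElem hkt]
    rw [show ((k : Int) + 1) = ((k + 1 : Nat) : Int) by push_cast; ring] at hcons ⊢
    simp only [pvALoop, hgw, hgt]
    by_cases h : w[k] = t[k]
    · rw [if_pos (by rw [h]), ih (k + 1) (tmp + 1) (by omega)]
      rw [drop_eq_cons_of_lt w k hkw, drop_eq_cons_of_lt t k hkt, cpl_cons, if_pos h]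
      push_cast
      ring
    · rw [if_neg (by simpa using h)]
      rw [drop_eq_cons_of_lt w k hkw, drop_eq_cons_of_lt t k hkt, cpl_cons, if_neg h]
      simp

-- maximum of cpl over a list of words (foldr form)
def bestOf (t : List Char) (cands : List String) : Nat :=
  cands.foldr (fun w r => max (cpl w.toList t) r) 0

@[simp] theorem bestOf_nil (t : List Char) : bestOf t [] = 0 := rfl
@[simp] theorem bestOf_cons (t : List Char) (w : String) (ws : List String) :
    bestOf t (w :: ws) = max (cpl w.toList t) (bestOf t ws) := rfl

theorem bestOf_le (t : List Char) (cands : List String) (c : Nat)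
    (h : ∀ w ∈ cands, cpl w.toList t ≤ c) : bestOf t cands ≤ c := by
  induction cands with
  | nil => simp
  | cons w ws ih =>
    simp only [bestOf_cons, max_le_iff]
    exact ⟨h w (by simp), ih (fun u hu => h u (by simp [hu]))⟩

theorem le_bestOf (t : List Char) (cands : List String) (w : String) (hw : w ∈ cands) :
    cpl w.toList t ≤ bestOf t cands := by
  induction cands with
  | nil => simp at hw
  | cons u us ih =>
    rcases List.mem_cons.mp hw with h | h
    · subst h; simp
    · simp only [bestOf_cons]
      exact le_max_of_le_right (ih h)

theorem bestOf_const (t : List Char) (cands : List String) (c : Nat)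
    (hne : cands ≠ []) (h : ∀ w ∈ cands, cpl w.toList t = c) : bestOf t cands = c := by
  rcases cands with _ | ⟨w, ws⟩
  · exact absurd rfl hne
  · have h1 : cpl w.toList t ≤ bestOf t (w :: ws) := le_bestOf _ _ _ (by simp)
    have h2 : bestOf t (w :: ws) ≤ c := bestOf_le _ _ _ (fun u hu => le_of_eq (h u hu))
    have h3 := h w (by simp)
    omega

theorem bestOf_filter (t : List Char) (k : Nat) : ∀ (cands : List String),
    (∀ w ∈ cands, k ≤ cpl w.toList t) →
    cands.filter (fun w => decide (k + 1 ≤ cpl w.toList t)) ≠ [] →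
    bestOf t (cands.filter (fun w => decide (k + 1 ≤ cpl w.toList t))) = bestOf t cands := by
  intro cands
  induction cands with
  | nil => intro _ h; simp at h
  | cons w ws ih =>
    intro hall hne
    by_cases hw : k + 1 ≤ cpl w.toList t
    · rw [List.filter_cons_of_pos (by simpa using hw)] at hne ⊢
      simp only [bestOf_cons]
      by_cases hws : ws.filter (fun w => decide (k + 1 ≤ cpl w.toList t)) = []
      · rw [hws]
        simp only [bestOf_nil]
        have hle : bestOf t ws ≤ k := by
          apply bestOf_le
          intro u hu
          by_contra hc
          have : u ∈ ws.filter (fun w => decide (k + 1 ≤ cpl w.toList t)) := by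
            simp [List.mem_filter, hu]; omega
          rw [hws] at this; simp at this
        omega
      · rw [ih (fun u hu => hall u (by simp [hu])) hws]
    · rw [List.filter_cons_of_neg (by simpa using hw)] at hne ⊢
      have hwk : cpl w.toList t = k := by
        have := hall w (by simp)
        omega
      rw [ih (fun u hu => hall u (by simp [hu])) hne]
      obtain ⟨u, hu⟩ := List.exists_mem_of_ne_nil _ hne
      have hu' := List.mem_filter.mp hu
      have h1 : k + 1 ≤ cpl u.toList t := by simpa using hu'.2
      have h2 : cpl u.toList t ≤ bestOf t ws := le_bestOf _ _ _ hu'.1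
      simp only [bestOf_cons, hwk]
      omega

-- the B-side filter predicate is exactly "matches one character further"
theorem filter_pred_eq (t : List Char) (k : Nat) (hkt : k < t.length)
    (w : String) (hw : k ≤ cpl w.toList t) :
    (decide ((k : Int) < PySem.Str.len w) &&
      (PySem.List.pyGet? w.toList (k : Int) == PySem.List.pyGet? t (k : Int)))
      = decide (k + 1 ≤ cpl w.toList t) := by
  have hiff := cpl_succ_iff k w.toList t hw hkt
  have hlen : PySem.Str.len w = (w.toList.length : Int) := by simp
  rw [hlen]
  simp only [PySem.List.pyGet?_natCast]
  rcases Nat.lt_or_ge k w.toList.length with h1 | h1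
  · by_cases h2 : w.toList[k]? = t[k]?
    · have hcp : k + 1 ≤ cpl w.toList t := hiff.mpr ⟨h1, h2⟩
      simp [hcp, h2]
      simpa using h1
    · have hcp : ¬ (k + 1 ≤ cpl w.toList t) := fun hh => h2 (hiff.mp hh).2
      simp [hcp, h2]
  · have hcp : ¬ (k + 1 ≤ cpl w.toList t) := fun hh => by
      have := (hiff.mp hh).1; omega
    have hnl : ¬ ((k : Int) < (w.toList.length : Int)) := by
      exact_mod_cast Nat.not_lt.mpr h1
    simp [hcp]
    have h1' : w.length ≤ k := by simpa using h1
    exact fun hc => absurd hc (by omega)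

theorem pvBLoop_eq (t : List Char) : ∀ (m k : Nat) (cands : List String),
    t.length - k = m → cands ≠ [] → (∀ w ∈ cands, k ≤ cpl w.toList t) →
    pvBLoop t (PySem.List.pyRange (k : Int) (t.length : Int) 1) cands (k : Int)
      = (bestOf t cands : Int) := by
  intro m
  induction m with
  | zero =>
    intro k cands hm hne hall
    obtain ⟨w, hw⟩ := List.exists_mem_of_ne_nil _ hne
    have hk : k ≤ t.length := le_trans (hall w hw) (cpl_le_right _ _)
    have hkt : k = t.length := by omega
    have hnil : PySem.List.pyRange (k : Int) (t.length : Int) 1 = [] := by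
      apply PySem.List.pyRange_one_eq_nil; omega
    rw [hnil]
    simp only [pvBLoop]
    have : bestOf t cands = k := by
      apply bestOf_const t cands k hne
      intro u hu
      have h1 := hall u hu
      have h2 := cpl_le_right u.toList t
      omega
    rw [this]
  | succ m ih =>
    intro k cands hm hne hall
    have hkt : k < t.length := by omega
    rw [PySem.List.pyRange_one_cons (by omega : (k : Int) < (t.length : Int))]
    simp only [pvBLoop]
    have hfe : cands.filter (fun w =>
        decide ((k : Int) < PySem.Str.len w) &&
          (PySem.List.pyGet? w.toList (k : Int) == PySem.List.pyGet? t (k : Int)))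
        = cands.filter (fun w => decide (k + 1 ≤ cpl w.toList t)) := by
      apply List.filter_congr
      intro w hw
      exact filter_pred_eq t k hkt w (hall w hw)
    rw [hfe]
    by_cases hc : cands.filter (fun w => decide (k + 1 ≤ cpl w.toList t)) = []
    · rw [if_pos hc]
      have : bestOf t cands = k := by
        apply bestOf_const t cands k hne
        intro u hu
        have h1 := hall u hu
        by_contra hcc
        have : u ∈ cands.filter (fun w => decide (k + 1 ≤ cpl w.toList t)) := by
          simp [List.mem_filter, hu]; omega
        rw [hc] at this; simp at this
      rw [this]
    · rw [if_neg hc]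
      rw [show (k : Int) + 1 = ((k + 1 : Nat) : Int) by push_cast; ring]
      rw [ih (k + 1) _ (by omega) hc ?_]
      · rw [bestOf_filter t k cands hall hc]
      · intro u hu
        have := List.mem_filter.mp hu
        simpa using this.2

theorem a_eq_bestOf (dic : List String) (target : String) : ∀ (ret : Int), 0 ≤ ret →
    dic.foldl (fun ret word =>
      let tmp := pvALoop word.toList target.toList
        (PySem.List.pyRange 0 (min (PySem.Str.len word) (PySem.Str.len target)) 1) 0
      if tmp > ret then tmp else ret) ret
      = max ret (bestOf target.toList dic : Int) := by
  induction dic with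
  | nil =>
    intro ret hret
    simp only [List.foldl_nil, bestOf_nil]
    omega
  | cons w ws ih =>
    intro ret hret
    simp only [List.foldl_cons]
    have hlen : (min (PySem.Str.len w) (PySem.Str.len target))
        = min ((w.toList.length : Int)) ((target.toList.length : Int)) := by
      simp
    have hloop : pvALoop w.toList target.toList
        (PySem.List.pyRange 0 (min (PySem.Str.len w) (PySem.Str.len target)) 1) 0
        = (cpl w.toList target.toList : Int) := by
      rw [hlen]
      have := pvALoop_eq w.toList target.toList
        (min w.toList.length target.toList.length) 0 0 (by omega)
      simpa using this
    simp only [hloop]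
    have hstep : (if (cpl w.toList target.toList : Int) > ret then (cpl w.toList target.toList : Int) else ret)
        = max ret (cpl w.toList target.toList : Int) := by
      split_ifs <;> omega
    rw [hstep, ih _ (by omega)]
    simp only [bestOf_cons]
    push_cast
    omega

-- ===== VERDICT (by name: the statement is the Claim_ definition above) =====
theorem the_longest_common_prefix_spec : Claim_equal_the_longest_common_prefix := by
  intro dic target _
  unfold Spec_the_longest_common_prefix
  unfold the_longest_common_prefix the_longest_common_prefix_alt
  rw [a_eq_bestOf dic target 0 le_rfl]
  have hbest0 : max (0 : Int) (bestOf target.toList dic : Int) = (bestOf target.toList dic : Int) := by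
    have : (0 : Int) ≤ (bestOf target.toList dic : Int) := by positivity
    omega
  rw [hbest0]
  have hlen : PySem.Str.len target = (target.toList.length : Int) := by simp
  rw [hlen]
  rcases eq_or_ne dic [] with hdic | hdic
  · subst hdic
    simp only [bestOf_nil, Nat.cast_zero]
    rcases Nat.eq_zero_or_pos target.toList.length with h0 | h0
    · rw [PySem.List.pyRange_one_eq_nil (by omega)]
      simp [pvBLoop]
    · rw [show (0 : Int) = ((0 : Nat) : Int) by rfl,
        PySem.List.pyRange_one_cons (by omega : ((0:Nat) : Int) < (target.toList.length : Int))]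
      simp [pvBLoop]
  · have := pvBLoop_eq target.toList target.toList.length 0 dic (by omega) hdic
      (by intro u hu; omega)
    simpa using this.symm
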